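-- pv_equiv track=rewrite | github.com/zysszy/GrammarCNN | predict/test/test_bleu/ast2code.py | findtheson
-- ===== SOURCE A (Python) =====
-- def findtheson(node):
--     output = []
--     count = 0
--     site = 0
--     for i in node[1:]:
--         site += 1
--         if i == "^":
--             count -= 1
--         else :
--             count += 1
--         if count < 0:
--             break
--         elif count == 1 and i != "^":
--             output.append(site)
--     return output
-- ===== SOURCE B (Python) =====
-- def findtheson(node):
--     # child-by-child parser: record each top-level child start, then skip its subtree
--     output = []
--     pos = 1
--     n = len(node)
--     while pos < n:
--         if node[pos] == "^":
--             break
--         output.append(pos)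
--         depth = 1
--         pos += 1
--         while pos < n and depth > 0:
--             if node[pos] == "^":
--                 depth -= 1
--             else:
--                 depth += 1
--             pos += 1
--     return output
-- ===== Notes on version B (the rewrite author's own statement) =====
-- stated objective: alternative
-- what changed: Replaced the single flat pass with one global depth counter by a child-by-child parser: an outer loop records each top-level child start and an inner loop skips that whole subtree with a local depth counter.
import Mathlib
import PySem

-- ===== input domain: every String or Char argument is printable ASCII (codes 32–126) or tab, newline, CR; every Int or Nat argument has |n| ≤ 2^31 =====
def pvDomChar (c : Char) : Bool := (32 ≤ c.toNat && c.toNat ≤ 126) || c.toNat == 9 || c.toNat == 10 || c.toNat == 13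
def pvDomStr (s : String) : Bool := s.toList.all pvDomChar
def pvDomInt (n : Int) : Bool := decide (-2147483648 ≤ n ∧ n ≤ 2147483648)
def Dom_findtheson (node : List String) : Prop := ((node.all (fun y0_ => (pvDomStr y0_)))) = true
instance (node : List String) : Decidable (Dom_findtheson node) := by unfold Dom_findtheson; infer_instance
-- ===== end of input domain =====

-- B is a child-by-child parser (outer loop per child, inner subtree skip) instead of A's single flat depth-counter pass; same cost.

-- ===== PORT A =====
-- loop of A over node[1:] with state (count, site); break is modelled by returning []
def goA : List String → Int → Int → List Int
  | [], _, _ => []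
  | i :: rest, count, site =>
      let site' := site + 1
      let count' := if i = "^" then count - 1 else count + 1
      if count' < 0 then []
      else if count' = 1 ∧ i ≠ "^" then site' :: goA rest count' site'
      else goA rest count' site'

-- node[1:] = node.drop 1 (exact: nonnegative start slice)
def findtheson (node : List String) : List Int := goA (node.drop 1) 0 0

-- ===== PORT B =====
-- inner loop of B: skip the current subtree; returns (remaining tokens, next position)
def skipB : List String → Int → Int → List String × Int
  | [], pos, _ => ([], pos)
  | tok :: rest, pos, depth =>
      if 0 < depth then
        skipB rest (pos + 1) (if tok = "^" then depth - 1 else depth + 1)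
      else (tok :: rest, pos)

theorem skipB_len : ∀ (l : List String) (pos depth : Int), (skipB l pos depth).1.length ≤ l.length := by
  intro l
  induction l with
  | nil => intro pos depth; simp [skipB]
  | cons tok rest ih =>
      intro pos depth
      simp only [skipB]
      split
      · exact Nat.le_succ_of_le (ih _ _)
      · simp

-- outer loop of B over the tokens after node[0]; pos is the index of the head token
def goB : List String → Int → List Int
  | [], _ => []
  | tok :: rest, pos =>
      if tok = "^" then []
      else
        let p := skipB rest (pos + 1) 1
        pos :: goB p.1 p.2
termination_by l _ => l.length
decreasing_by
  simp only [List.length_cons]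
  exact Nat.lt_succ_of_le (skipB_len rest (pos + 1) 1)

def findtheson_alt (node : List String) : List Int := goB (node.drop 1) 1

-- ===== PRECONDITION & SPEC =====
def Spec_findtheson (node : List String) (out : List Int) : Prop := out = findtheson_alt node
instance (node : List String) (out : List Int) : Decidable (Spec_findtheson node out) := by unfold Spec_findtheson; infer_instance

-- ===== CLAIM (what is proved, stated in full; the proofs are below) =====
def Claim_equal_findtheson : Prop := ∀ (node : List String), Dom_findtheson node → Spec_findtheson node (findtheson node)

-- ===== LEMMAS AND PROOFS =====

theorem skipB_stop (l : List String) (pos depth : Int) (h : ¬ 0 < depth) :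
    skipB l pos depth = (l, pos) := by
  cases l with
  | nil => simp [skipB]
  | cons tok rest => simp [skipB, h]

-- skipping a subtree in B matches A's traversal at depth c ≥ 1 (which records nothing)
theorem skip_eq : ∀ (l : List String) (c site : Int), 1 ≤ c →
    goA l c site = goA (skipB l (site + 1) c).1 0 ((skipB l (site + 1) c).2 - 1) := by
  intro l
  induction l with
  | nil => intro c site hc; simp [skipB, goA]
  | cons i rest ih =>
      intro c site hc
      have hd : (0 : Int) < c := hc
      by_cases hi : i = "^"
      · subst hi
        have hnn : ¬ (c - 1 < 0) := by omega
        have hrec : ¬ (c - 1 = 1 ∧ ("^" : String) ≠ "^") := by simp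
        simp only [goA, skipB, if_pos hd]
        rw [if_pos (show True from trivial), if_neg hnn, if_neg hrec]
        by_cases h1 : 1 ≤ c - 1
        · have := ih (c - 1) (site + 1) h1
          simpa using this
        · have hz : c - 1 = 0 := by omega
          rw [hz, skipB_stop rest (site + 1 + 1) 0 (by omega)]
          simp
      · have hnn : ¬ (c + 1 < 0) := by omega
        have hrec : ¬ (c + 1 = 1 ∧ i ≠ "^") := by
          rintro ⟨h1, _⟩; omega
        simp only [goA, skipB, if_pos hd]
        rw [if_neg hi, if_neg hnn, if_neg hrec]
        have := ih (c + 1) (site + 1) (by omega)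
        simpa using this

theorem main_eq : ∀ (n : Nat) (l : List String) (site : Int), l.length ≤ n →
    goA l 0 site = goB l (site + 1) := by
  intro n
  induction n with
  | zero =>
      intro l site hl
      have : l = [] := List.eq_nil_of_length_eq_zero (Nat.le_zero.mp hl)
      subst this; simp [goA, goB]
  | succ m ih =>
      intro l site hl
      cases l with
      | nil => simp [goA, goB]
      | cons tok rest =>
          by_cases hi : tok = "^"
          · simp [goA, goB, hi]
          · have hnn : ¬ ((0 : Int) + 1 < 0) := by omega
            have hyes : ((0 : Int) + 1 = 1 ∧ tok ≠ "^") := ⟨by omega, hi⟩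
            simp only [goA, goB, if_neg hi]
            rw [if_neg hnn, if_pos hyes, show (0 : Int) + 1 = 1 from by norm_num]
            have hskip := skip_eq rest 1 (site + 1) (le_refl 1)
            have hlen : (skipB rest (site + 1 + 1) 1).1.length ≤ m := by
              have := skipB_len rest (site + 1 + 1) 1
              simp only [List.length_cons] at hl
              omega
            have hrec := ih (skipB rest (site + 1 + 1) 1).1 ((skipB rest (site + 1 + 1) 1).2 - 1) hlen
            have heq : (skipB rest (site + 1 + 1) 1).2 - 1 + 1 = (skipB rest (site + 1 + 1) 1).2 := by omega
            rw [hskip, hrec, heq]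

-- ===== VERDICT (by name: the statement is the Claim_ definition above) =====
theorem findtheson_spec : Claim_equal_findtheson := by
  intro node _
  unfold Spec_findtheson findtheson findtheson_alt
  have h := main_eq (node.drop 1).length (node.drop 1) 0 (le_refl _)
  simpa using h
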